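-- pv_equiv track=rewrite | github.com/cai-jianfeng/glossification_editing_programs | data/BBPE.py | dynamic_progress
-- ===== SOURCE A (Python) =====
-- def dynamic_progress(byte_list):
--     """
--     将给定的字节序列使用 DP 算法转化为原始的单词
--     :param byte_list: type: list(str)
--     :return: type: tuple(int, str)
--     """
--     f = [0] * (len(byte_list) + 1)
--     bt = [-1] * len(f)
--     for k in range(1, len(f)):
--         for t in range(1, 5):
--             if k - t >= 0 and f[k-t] + valid(k-t, k, byte_list)[0] > f[k]:
--                 f[k] = f[k-t] + valid(k-t+1, k, byte_list)[0]
--                 bt[k] = k-t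
--     bt_num = bt[-1]
--     cur_num = len(byte_list)
--     result = ''
--     while bt_num != -1 and cur_num > 0:
--         result = valid(bt_num, cur_num, byte_list)[1] + ' ' + result
--         cur_num = bt_num
--         bt_num = bt[cur_num]
--     result = result.strip()
--     return f[-1], result
--
-- def valid(i, j, byte_list):
--     """
--     判断当前 byte_list 中 的 i ~ j 的十六进制数对应的 UTF-8 的正确性
--     :param i: type: int
--     :param j: type: int
--     :param byte_list: type: list(str)
--     :return: int, str
--     """
--     # TODO: 后续需根据 UTF-8 的编码特性来进行改进
--     number = 0
--     for k in range(i, j):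
--         number = number * 256 + int(byte_list[k], 16)
--     try:
--         ch = chr(number)
--     except ValueError:
--         return 0, ' '
--     return 1, ch
-- ===== SOURCE B (Python) =====
-- def valid(i, j, byte_list):
--     number = 0
--     for k in range(i, j):
--         number = number * 256 + int(byte_list[k], 16)
--     try:
--         ch = chr(number)
--     except ValueError:
--         return 0, ' '
--     return 1, ch
--
-- def dynamic_progress(byte_list):
--     # same DP fill as before, but the best segmentation string for each prefix is
--     # built forward alongside f, so no backtracking array / while-loop is needed
--     n = len(byte_list)
--     f = [0] * (n + 1)
--     seg = [''] * (n + 1)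
--     for k in range(1, n + 1):
--         for t in range(1, 5):
--             if k - t >= 0 and f[k-t] + valid(k-t, k, byte_list)[0] > f[k]:
--                 f[k] = f[k-t] + valid(k-t+1, k, byte_list)[0]
--                 seg[k] = (seg[k-t] + ' ' if seg[k-t] else '') + valid(k-t, k, byte_list)[1]
--     return f[n], seg[n].strip()
-- ===== Notes on version B (the rewrite author's own statement) =====
-- stated objective: simpler
-- what changed: B keeps the identical DP fill for f but builds the best segmentation string for every prefix forward alongside the DP, so the backtracking array bt and the separate backward while-loop reconstruction disappear.
-- outside the precondition, e.g. on dynamic_progress(['d8', '41']): A returns (2, 'Ø A'), B returns (2, 'Ø A')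
import Mathlib
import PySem

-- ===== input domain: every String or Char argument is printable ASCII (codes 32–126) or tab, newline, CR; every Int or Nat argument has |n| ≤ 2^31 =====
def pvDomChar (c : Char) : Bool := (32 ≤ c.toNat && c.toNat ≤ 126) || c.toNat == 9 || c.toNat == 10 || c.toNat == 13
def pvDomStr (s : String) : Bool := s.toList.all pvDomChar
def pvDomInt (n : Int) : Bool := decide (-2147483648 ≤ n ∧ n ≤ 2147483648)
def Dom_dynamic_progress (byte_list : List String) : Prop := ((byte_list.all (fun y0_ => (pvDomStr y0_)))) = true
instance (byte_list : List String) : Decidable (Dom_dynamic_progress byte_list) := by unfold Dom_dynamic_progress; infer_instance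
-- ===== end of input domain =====

-- B replaces A's backtracking array and backward while-loop reconstruction by best-segmentation
-- strings built forward alongside the identical DP fill (objective: simpler, same cost).

-- ===== PORT A =====
-- shared helper: the module helper `valid(i, j, byte_list)`, used by both Pythons.
-- chr(n) wrapped in valid's try/except ValueError; exact except on the surrogate code points
-- 0xD800–0xDFFF (Python chr returns a lone surrogate there, unrepresentable in Lean's Char) —
-- those windows are excluded by Pre_.
def pyChr (n : Int) : Int × String :=
  if 0 ≤ n ∧ n < 1114112 then (1, String.ofList [Char.ofNat n.toNat]) else (0, " ")

-- valid's base-256 number; indices are Nats (every call site passes i ≥ 0, j ≤ len).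
-- int(byte_list[k], 16) is PySem.Int.ofStrBase?; under Pre_ it always succeeds, so the
-- getD defaults never fire on admitted inputs (Python would raise ValueError there).
def segNum (byte_list : List String) (i j : Nat) : Int :=
  (List.range' i (j - i)).foldl
    (fun number k => number * 256 + (PySem.Int.ofStrBase? (byte_list.getD k "") 16).getD 0) 0

def validF (i j : Nat) (byte_list : List String) : Int × String := pyChr (segNum byte_list i j)

-- A's inner 'for t in range(1, 5)' body; state is the pair (f, bt); 'k - t >= 0' is 't ≤ k'
def innA (byte_list : List String) (k : Nat) (fb : List Int × List Int) (t : Nat) :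
    List Int × List Int :=
  if t ≤ k ∧ fb.1.getD (k - t) 0 + (validF (k - t) k byte_list).1 > fb.1.getD k 0 then
    (fb.1.set k (fb.1.getD (k - t) 0 + (validF (k - t + 1) k byte_list).1),
     fb.2.set k ((k : Int) - (t : Int)))
  else fb

def stepA (byte_list : List String) (fb : List Int × List Int) (k : Nat) :
    List Int × List Int :=
  [1, 2, 3, 4].foldl (innA byte_list k) fb

-- A's reconstruction while-loop; the fuel (first argument, n + 1 at the call site) only makes
-- the recursion structural: bt entries strictly decrease, so it is never exhausted
def btRebuild (byte_list : List String) (bt : List Int) :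
    Nat → Int → Int → String → String
  | 0, _, _, acc => acc
  | fuel + 1, bt_num, cur_num, acc =>
    if bt_num ≠ -1 ∧ cur_num > 0 then
      btRebuild byte_list bt fuel (bt.getD bt_num.toNat (-1)) bt_num
        ((validF bt_num.toNat cur_num.toNat byte_list).2 ++ " " ++ acc)
    else acc

def dynamic_progress (byte_list : List String) : Int × String :=
  let n := byte_list.length
  let fb := (List.range' 1 n).foldl (stepA byte_list)
    (List.replicate (n + 1) 0, List.replicate (n + 1) (-1))
  let result := btRebuild byte_list fb.2 (n + 1) (fb.2.getD n (-1)) (n : Int) ""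
  (fb.1.getD n 0, PySem.Str.strip result)

-- ===== PORT B =====
-- B's inner body: the same f update, but the best segmentation string is extended forward
def innB (byte_list : List String) (k : Nat) (fs : List Int × List String) (t : Nat) :
    List Int × List String :=
  if t ≤ k ∧ fs.1.getD (k - t) 0 + (validF (k - t) k byte_list).1 > fs.1.getD k 0 then
    (fs.1.set k (fs.1.getD (k - t) 0 + (validF (k - t + 1) k byte_list).1),
     fs.2.set k ((if fs.2.getD (k - t) "" ≠ "" then fs.2.getD (k - t) "" ++ " " else "") ++
       (validF (k - t) k byte_list).2))
  else fs

def stepB (byte_list : List String) (fs : List Int × List String) (k : Nat) :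
    List Int × List String :=
  [1, 2, 3, 4].foldl (innB byte_list k) fs

def dynamic_progress_alt (byte_list : List String) : Int × String :=
  let n := byte_list.length
  let fs := (List.range' 1 n).foldl (stepB byte_list)
    (List.replicate (n + 1) 0, List.replicate (n + 1) "")
  (fs.1.getD n 0, PySem.Str.strip (fs.2.getD n ""))

-- ===== PRECONDITION & SPEC =====
-- Pre_ excludes (a) inputs containing a string int(s, 16) rejects, where A (and B) raise
-- ValueError, and (b) inputs with a window of ≤ 4 byte-strings whose value is a Unicode
-- surrogate code point: there Python's chr returns a lone-surrogate character that Lean's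
-- Char/String cannot represent, so neither program can be ported faithfully on such inputs.
def Pre_dynamic_progress (byte_list : List String) : Prop :=
  (∀ s ∈ byte_list, (PySem.Int.ofStrBase? s 16).isSome = true) ∧
  ∀ i < byte_list.length, ∀ t ∈ [1, 2, 3, 4], i + t ≤ byte_list.length →
    ¬ (55296 ≤ segNum byte_list i (i + t) ∧ segNum byte_list i (i + t) ≤ 57343)

instance (byte_list : List String) : Decidable (Pre_dynamic_progress byte_list) := by
  unfold Pre_dynamic_progress; infer_instance

def pvWitness_dynamic_progress : List String := ["41", "e9", "20"]

def Spec_dynamic_progress (byte_list : List String) (out : Int × String) : Prop :=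
  out = dynamic_progress_alt byte_list
instance (byte_list : List String) (out : Int × String) : Decidable (Spec_dynamic_progress byte_list out) := by
  unfold Spec_dynamic_progress; infer_instance

-- ===== CLAIM (what is proved, stated in full; the proofs are below) =====
def Claim_equal_dynamic_progress : Prop :=
  ∀ (byte_list : List String), Dom_dynamic_progress byte_list →
    Pre_dynamic_progress byte_list →
    Spec_dynamic_progress byte_list (dynamic_progress byte_list)

-- ===== LEMMAS AND PROOFS =====

-- the link between A's backtracking entry bt[j] and B's forward segmentation string seg[j]
def Link (byte_list : List String) (bt : List Int) (seg : List String) (j : Nat) : Prop :=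
  (bt.getD j (-1) = -1 ∧ seg.getD j "" = "") ∨
  (∃ p : Nat, bt.getD j (-1) = (p : Int) ∧ p < j ∧
    seg.getD j "" =
      (if seg.getD p "" ≠ "" then seg.getD p "" ++ " " else "") ++ (validF p j byte_list).2 ∧
    seg.getD j "" ≠ "")

-- full relation between the two loop states after the outer iterations k = 1 .. m
def StRel (byte_list : List String) (n m : Nat)
    (fb : List Int × List Int) (fs : List Int × List String) : Prop :=
  fb.1 = fs.1 ∧ fb.2.length = n + 1 ∧ fs.2.length = n + 1 ∧
  (∀ j, Link byte_list fb.2 fs.2 j) ∧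
  (∀ j, m < j → fb.2.getD j (-1) = -1 ∧ fs.2.getD j "" = "")


theorem getD_set_ne {α : Type} (l : List α) (k j : Nat) (v d : α) (h : k ≠ j) :
    (l.set k v).getD j d = l.getD j d := by
  simp [List.getD, List.getElem?_set_ne h]

theorem getD_set_self {α : Type} (l : List α) (k : Nat) (v d : α) (h : k < l.length) :
    (l.set k v).getD k d = v := by
  simp [List.getD, h]

theorem getD_replicate_self {α : Type} (n j : Nat) (d : α) :
    (List.replicate n d).getD j d = d := by
  simp only [List.getD, List.getElem?_replicate]
  split <;> rfl

theorem validF_snd_eq (i j : Nat) (bl : List String) :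
    ∃ c, (validF i j bl).2 = String.ofList [c] := by
  unfold validF pyChr
  split
  · exact ⟨_, rfl⟩
  · exact ⟨' ', by decide⟩

theorem append_validF_ne (s : String) (i j : Nat) (bl : List String) :
    s ++ (validF i j bl).2 ≠ "" := by
  obtain ⟨c, hc⟩ := validF_snd_eq i j bl
  intro h
  have h2 := congrArg String.toList h
  rw [String.toList_append, hc] at h2
  simp at h2

theorem inn_step (bl : List String) (n k t : Nat) (ht : 1 ≤ t) (hk : k ≤ n)
    (fb : List Int × List Int) (fs : List Int × List String)
    (h : StRel bl n k fb fs) :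
    StRel bl n k (innA bl k fb t) (innB bl k fs t) := by
  obtain ⟨f1, bt⟩ := fb
  obtain ⟨f2, seg⟩ := fs
  obtain ⟨h1, hlb, hls, hlink, hhc⟩ := h
  dsimp only at h1 hlb hls hlink hhc
  subst h1
  unfold innA innB
  dsimp only
  by_cases hc : (t ≤ k ∧ f1.getD (k - t) 0 + (validF (k - t) k bl).1 > f1.getD k 0)
  · rw [if_pos hc, if_pos hc]
    have hkb : k < bt.length := by omega
    have hks : k < seg.length := by omega
    refine ⟨rfl, by simp [hlb], by simp [hls], ?_, ?_⟩
    · intro j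
      dsimp only
      rcases Nat.lt_trichotomy j k with hj | hj | hj
      · -- j < k : all referenced entries unchanged
        rcases hlink j with ⟨e1, e2⟩ | ⟨p, e1, hpj, e3, e4⟩
        · exact Or.inl ⟨by rw [getD_set_ne _ _ _ _ _ (by omega : k ≠ j)]; exact e1,
                        by rw [getD_set_ne _ _ _ _ _ (by omega : k ≠ j)]; exact e2⟩
        · refine Or.inr ⟨p, ?_, hpj, ?_, ?_⟩
          · rw [getD_set_ne _ _ _ _ _ (by omega : k ≠ j)]; exact e1
          · rw [getD_set_ne _ _ _ _ _ (by omega : k ≠ j),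
                getD_set_ne _ _ _ _ _ (by omega : k ≠ p)]
            exact e3
          · rw [getD_set_ne _ _ _ _ _ (by omega : k ≠ j)]; exact e4
      · -- j = k : the freshly written entry
        subst hj
        refine Or.inr ⟨j - t, ?_, by omega, ?_, ?_⟩
        · have hcast : ((j : Int) - (t : Int)) = ((j - t : Nat) : Int) := by omega
          rw [getD_set_self _ _ _ _ hkb, hcast]
        · rw [getD_set_ne _ _ _ _ _ (by omega : j ≠ j - t),
              getD_set_self _ _ _ _ hks]
        · rw [getD_set_self _ _ _ _ hks]
          exact append_validF_ne _ _ _ _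
      · -- j > k : was clear, stays clear
        obtain ⟨e1, e2⟩ := hhc j hj
        exact Or.inl ⟨by rw [getD_set_ne _ _ _ _ _ (by omega : k ≠ j)]; exact e1,
                      by rw [getD_set_ne _ _ _ _ _ (by omega : k ≠ j)]; exact e2⟩
    · intro j hj
      obtain ⟨e1, e2⟩ := hhc j hj
      exact ⟨by rw [getD_set_ne _ _ _ _ _ (by omega : k ≠ j)]; exact e1,
             by rw [getD_set_ne _ _ _ _ _ (by omega : k ≠ j)]; exact e2⟩
  · rw [if_neg hc, if_neg hc]
    exact ⟨rfl, hlb, hls, hlink, hhc⟩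

theorem step_rel (bl : List String) (n k : Nat) (hk1 : 1 ≤ k) (hk : k ≤ n)
    (fb : List Int × List Int) (fs : List Int × List String)
    (h : StRel bl n (k - 1) fb fs) :
    StRel bl n k (stepA bl fb k) (stepB bl fs k) := by
  have h0 : StRel bl n k fb fs := by
    obtain ⟨h1, hlb, hls, hlink, hhc⟩ := h
    exact ⟨h1, hlb, hls, hlink, fun j hj => hhc j (by omega)⟩
  unfold stepA stepB
  simp only [List.foldl]
  exact inn_step bl n k 4 (by omega) hk _ _
    (inn_step bl n k 3 (by omega) hk _ _
      (inn_step bl n k 2 (by omega) hk _ _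
        (inn_step bl n k 1 (by omega) hk _ _ h0)))

theorem fold_rel (bl : List String) (n m : Nat) (hm : m ≤ n) :
    StRel bl n m
      ((List.range' 1 m).foldl (stepA bl) (List.replicate (n + 1) 0, List.replicate (n + 1) (-1)))
      ((List.range' 1 m).foldl (stepB bl) (List.replicate (n + 1) 0, List.replicate (n + 1) "")) := by
  induction m with
  | zero =>
    refine ⟨rfl, by simp, by simp, ?_, ?_⟩
    · intro j
      exact Or.inl ⟨getD_replicate_self _ _ _, getD_replicate_self _ _ _⟩
    · intro j _
      exact ⟨getD_replicate_self _ _ _, getD_replicate_self _ _ _⟩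
  | succ m ih =>
    have hrange : List.range' 1 (m + 1) = List.range' 1 m ++ [m + 1] := by
      rw [List.range'_concat]; norm_num; omega
    rw [hrange, List.foldl_append, List.foldl_append]
    simp only [List.foldl]
    exact step_rel bl n (m + 1) (by omega) hm _ _
      (by simpa using ih (by omega))

theorem rebuild_eq (bl : List String) (bt : List Int) (seg : List String)
    (hlink : ∀ j, Link bl bt seg j) :
    ∀ fuel j acc, j < fuel →
      btRebuild bl bt fuel (bt.getD j (-1)) (j : Int) acc =
        (if seg.getD j "" ≠ "" then seg.getD j "" ++ " " else "") ++ acc := by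
  intro fuel
  induction fuel with
  | zero => intro j acc h; omega
  | succ fuel ih =>
    intro j acc hj
    rcases hlink j with ⟨e1, e2⟩ | ⟨p, e1, hpj, e3, e4⟩
    · rw [e1, e2]
      simp [btRebuild]
    · rw [e1]
      have hcond : ((p : Int) ≠ -1 ∧ (j : Int) > 0) := by
        constructor <;> omega
      rw [btRebuild, if_pos hcond]
      have htn : ((p : Int)).toNat = p := Int.toNat_natCast p
      have hjn : ((j : Nat) : Int).toNat = j := Int.toNat_natCast j
      rw [htn, hjn]
      rw [ih p _ (by omega)]
      rw [if_pos e4, e3]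
      by_cases hp : seg.getD p "" ≠ "" <;> simp [String.append_assoc]

theorem strip_append_space (s : String) :
    PySem.Str.strip (s ++ " ") = PySem.Str.strip s := by
  rw [← String.toList_inj, PySem.Str.toList_strip, PySem.Str.toList_strip, String.toList_append]
  have hsp : (" " : String).toList = [' '] := by decide
  rw [hsp]
  unfold PySem.Chars.strip PySem.Chars.lstrip PySem.Chars.rstrip
  rw [List.dropWhile_append]
  by_cases h : (List.dropWhile PySem.Chars.isspace s.toList).isEmpty = true
  · rw [if_pos h]
    rw [List.isEmpty_iff] at h
    have h2 : List.dropWhile PySem.Chars.isspace [' '] = [] := by decide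
    rw [h, h2]
  · rw [if_neg h]
    rw [List.reverse_append]
    simp only [List.reverse_cons, List.reverse_nil, List.nil_append, List.singleton_append]
    rw [List.dropWhile_cons_of_pos (by decide : PySem.Chars.isspace ' ' = true)]

-- ===== VERDICT (by name: the statement is the Claim_ definition above) =====
theorem dynamic_progress_spec : Claim_equal_dynamic_progress := by
  intro bl _ _
  unfold Spec_dynamic_progress dynamic_progress dynamic_progress_alt
  obtain ⟨h1, hlb, hls, hlink, -⟩ := fold_rel bl bl.length bl.length le_rfl
  rw [Prod.mk.injEq]
  constructor
  · rw [h1]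
  · rw [rebuild_eq bl _ _ hlink (bl.length + 1) bl.length "" (by omega)]
    set sn := ((List.range' 1 bl.length).foldl (stepB bl)
      (List.replicate (bl.length + 1) 0, List.replicate (bl.length + 1) "")).2.getD bl.length ""
    by_cases hsn : sn ≠ ""
    · rw [if_pos hsn]
      have : sn ++ " " ++ "" = sn ++ " " := by simp
      rw [this, strip_append_space]
    · rw [if_neg hsn]
      rw [not_ne_iff] at hsn
      rw [hsn]
      simp
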